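-- pv_equiv track=rewrite | github.com/Scrat-P/python-test-task | flag.py | flag
-- ===== SOURCE A (Python) =====
-- INVALID_ARGUMENT_MESSAGE = "N must be an integer even number."
--
-- class ArgumentError(Exception):
--     """Exception that reporting about invalid function argument."""
--
-- def flag(n):
--     """Return the Japanese flag in ASCII art."""
--     if not isinstance(n, int) or n&1 != 0:
--         raise ArgumentError(INVALID_ARGUMENT_MESSAGE)
--
--     width = 3*n
--     half_flag = ['#' * (width+2)]
--     half_flag.extend([f"#{' '*width}#"] * (n//2))
--
--     for i in range(n//2):
--         circle_chord = f"*{'o' * 2*i}*"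
--         half_flag.append(f"#{circle_chord:^{width}}#")
--
--     return '\n'.join(half_flag + half_flag[::-1])
-- ===== SOURCE B (Python) =====
-- INVALID_ARGUMENT_MESSAGE = "N must be an integer even number."
--
-- class ArgumentError(Exception):
--     """Exception that reporting about invalid function argument."""
--
-- def flag(n):
--     """Return the Japanese flag in ASCII art."""
--     if not isinstance(n, int) or n & 1 != 0:
--         raise ArgumentError(INVALID_ARGUMENT_MESSAGE)
--
--     width = 3 * n
--     hollow = n // 2
--     border = '#' * (width + 2)
--     middle = []
--     for r in range(1, 2 * n + 1):
--         d = min(r, 2 * n + 1 - r)  # distance to the nearer horizontal border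
--         if d <= hollow:
--             middle.append(f"#{' ' * width}#")
--         else:
--             middle.append(f"#{'*' + 'oo' * (d - hollow - 1) + '*':^{width}}#")
--     return '\n'.join([border] + middle + [border])
-- ===== Notes on version B (the rewrite author's own statement) =====
-- stated objective: alternative
-- what changed: B emits the two border lines explicitly and renders every middle row in one pass over row indices 1..2n, keyed by each row's distance to the nearer horizontal border, instead of building a half-flag list (border, replicated hollow band, circle loop) and concatenating it with its reversal.
import Mathlib
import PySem

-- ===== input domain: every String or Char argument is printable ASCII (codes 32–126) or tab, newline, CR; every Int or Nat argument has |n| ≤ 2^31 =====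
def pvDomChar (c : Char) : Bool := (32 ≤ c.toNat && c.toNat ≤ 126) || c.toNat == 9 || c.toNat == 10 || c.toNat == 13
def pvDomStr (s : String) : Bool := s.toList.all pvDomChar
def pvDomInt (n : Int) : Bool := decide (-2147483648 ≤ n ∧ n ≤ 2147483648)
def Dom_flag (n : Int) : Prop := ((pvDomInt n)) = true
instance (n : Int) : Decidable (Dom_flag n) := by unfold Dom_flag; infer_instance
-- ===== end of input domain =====

-- B emits the two border lines explicitly and renders every middle row in one pass
-- keyed by its distance to the nearer horizontal border, instead of mirroring a half-flag list.

-- ===== PORT A =====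
-- port of f"{s:^{w}}" (Python '^' format): exact — left pad (w-len)//2, extra space on the right; w ≤ len leaves s
def pyCenter (s : List Char) (w : Int) : List Char :=
  let pad : Int := w - (s.length : Int)
  if pad ≤ 0 then s
  else PySem.List.pyRepeat [' '] (PySem.Int.floordiv pad 2) ++ s ++
       PySem.List.pyRepeat [' '] (pad - PySem.Int.floordiv pad 2)

def flag (n : Int) : String :=
  let width := 3 * n
  let half0 : List (List Char) := [PySem.List.pyRepeat ['#'] (width + 2)]
  let half1 := half0 ++ PySem.List.pyRepeat ['#' :: PySem.List.pyRepeat [' '] width ++ ['#']] (PySem.Int.floordiv n 2)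
  let half := (PySem.List.pyRange 0 (PySem.Int.floordiv n 2) 1).foldl
      (fun acc i => acc ++ ['#' :: pyCenter ('*' :: (PySem.List.pyRepeat ['o'] (2 * i) ++ ['*'])) width ++ ['#']]) half1
  String.ofList (PySem.Chars.join ['\n'] (half ++ (PySem.List.slice? half none none (-1)).getD []))

-- ===== PORT B =====
def flag_alt (n : Int) : String :=
  let width := 3 * n
  let hollow := PySem.Int.floordiv n 2
  let border := PySem.List.pyRepeat ['#'] (width + 2)
  let middle := (PySem.List.pyRange 1 (2 * n + 1) 1).foldl
    (fun acc r =>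
      let d := min r (2 * n + 1 - r)
      acc ++ [ if d ≤ hollow then '#' :: PySem.List.pyRepeat [' '] width ++ ['#']
               else '#' :: pyCenter ('*' :: (PySem.List.pyRepeat ['o', 'o'] (d - hollow - 1) ++ ['*'])) width ++ ['#'] ]) []
  String.ofList (PySem.Chars.join ['\n'] ([border] ++ middle ++ [border]))

-- ===== PRECONDITION & SPEC =====
-- Pre_ excludes exactly the odd n, on which A raises ArgumentError.
def Pre_flag (n : Int) : Prop := n % 2 = 0
instance (n : Int) : Decidable (Pre_flag n) := by unfold Pre_flag; infer_instance
def pvWitness_flag : Int := (4)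
def Spec_flag (n : Int) (out : String) : Prop := out = flag_alt n
instance (n : Int) (out : String) : Decidable (Spec_flag n out) := by unfold Spec_flag; infer_instance

-- ===== CLAIM (what is proved, stated in full; the proofs are below) =====
def Claim_equal_flag : Prop := ∀ (n : Int), Dom_flag n → Pre_flag n → Spec_flag n (flag n)

-- ===== LEMMAS AND PROOFS =====

-- Nat-indexed row vocabulary (proof-side only), phrased in the ports' own terms
def borderRow (h : Nat) : List Char := PySem.List.pyRepeat ['#'] (3 * ((2 * h : Nat) : Int) + 2)
def hollowRow (h : Nat) : List Char := '#' :: PySem.List.pyRepeat [' '] (3 * ((2 * h : Nat) : Int)) ++ ['#']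
def circRow (h i : Nat) : List Char :=
  '#' :: pyCenter ('*' :: (PySem.List.pyRepeat ['o'] (2 * (i : Int)) ++ ['*'])) (3 * ((2 * h : Nat) : Int)) ++ ['#']
def rowOf (h r : Nat) : List Char :=
  if r = 0 then borderRow h else if r ≤ h then hollowRow h else circRow h (r - h - 1)

theorem flatten_replicate_pair (m : Nat) :
    (List.replicate m (['o', 'o'] : List Char)).flatten = List.replicate (2 * m) 'o' := by
  induction m with
  | zero => simp
  | succ k ih =>
      rw [List.replicate_succ, List.flatten_cons, ih]
      rw [show 2 * (k + 1) = 2 * k + 1 + 1 by ring, List.replicate_succ, List.replicate_succ]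
      rfl

theorem pyRepeat_pair_eq (x : Int) :
    PySem.List.pyRepeat (['o', 'o'] : List Char) x = PySem.List.pyRepeat ['o'] (2 * x) := by
  rw [PySem.List.pyRepeat_singleton]
  simp only [PySem.List.pyRepeat]
  rw [flatten_replicate_pair]
  congr 1
  omega

theorem floordiv_two_nat (h : Nat) :
    PySem.Int.floordiv ((2 * h : Nat) : Int) 2 = (h : Int) := by
  rw [PySem.Int.floordiv_eq_iff_of_pos (by omega)]
  push_cast
  omega

-- A's half-flag list, in Nat row vocabulary
theorem halfA_eq (h : Nat) :
    [PySem.List.pyRepeat ['#'] (3 * ((2 * h : Nat) : Int) + 2)] ++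
      PySem.List.pyRepeat ['#' :: PySem.List.pyRepeat [' '] (3 * ((2 * h : Nat) : Int)) ++ ['#']] ((h : Nat) : Int) ++
      (List.range h).map
        ((fun i : Int => '#' :: pyCenter ('*' :: (PySem.List.pyRepeat ['o'] (2 * i) ++ ['*'])) (3 * ((2 * h : Nat) : Int)) ++ ['#']) ∘
          (fun k : Nat => (0 : Int) + (k : Int)))
    = (List.range (2 * h + 1)).map (rowOf h) := by
  have hrange : List.range (2 * h + 1) = List.range (h + 1) ++ (List.range h).map (fun x => (h + 1) + x) := by
    rw [show 2 * h + 1 = (h + 1) + h by ring]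
    exact List.range_add
  rw [hrange, List.map_append]
  have hrep : PySem.List.pyRepeat ['#' :: PySem.List.pyRepeat [' '] (3 * ((2 * h : Nat) : Int)) ++ ['#']] ((h : Nat) : Int)
      = List.replicate h (hollowRow h) := by
    rw [PySem.List.pyRepeat_singleton]
    simp [hollowRow]
  rw [hrep]
  congr 1
  · -- border row then h hollow rows
    rw [List.range_succ_eq_map, List.map_cons, List.map_map]
    have h0 : rowOf h 0 = borderRow h := by simp [rowOf]
    have hcongr : ∀ i ∈ List.range h, (rowOf h ∘ Nat.succ) i = hollowRow h := by
      intro i hi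
      simp only [List.mem_range] at hi
      simp only [Function.comp, rowOf, Nat.succ_ne_zero, if_false]
      rw [if_pos (by omega)]
    rw [List.map_congr_left hcongr, List.map_const', List.length_range, h0]
    rfl
  · -- circle rows
    rw [List.map_map]
    apply List.map_congr_left
    intro i hi
    simp only [List.mem_range] at hi
    have hz : ((0 : Int) + (i : Int)) = ((i : Nat) : Int) := by omega
    simp only [Function.comp, hz]
    have hro : rowOf h (h + 1 + i) = circRow h i := by
      simp only [rowOf]
      rw [if_neg (by omega), if_neg (by omega)]
      congr 1
      omega
    rw [hro]
    rfl

-- B's middle row at loop index k (row r = k+1, k < 4h) in Nat row vocabulary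
theorem rowB_eq (h k : Nat) (hk : k < 4 * h) :
    (if min ((1 : Int) + (k : Int)) (2 * ((2 * h : Nat) : Int) + 1 - ((1 : Int) + (k : Int))) ≤ ((h : Nat) : Int) then
        '#' :: PySem.List.pyRepeat [' '] (3 * ((2 * h : Nat) : Int)) ++ ['#']
     else
        '#' :: pyCenter ('*' ::
            (PySem.List.pyRepeat ['o', 'o']
              (min ((1 : Int) + (k : Int)) (2 * ((2 * h : Nat) : Int) + 1 - ((1 : Int) + (k : Int))) - ((h : Nat) : Int) - 1) ++
             ['*'])) (3 * ((2 * h : Nat) : Int)) ++ ['#'])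
    = rowOf h (min (k + 1) (4 * h + 1 - (k + 1))) := by
  set M : Nat := min (k + 1) (4 * h + 1 - (k + 1)) with hM
  have hM1 : 1 ≤ M := by omega
  have hd : min ((1 : Int) + (k : Int)) (2 * ((2 * h : Nat) : Int) + 1 - ((1 : Int) + (k : Int))) = (M : Int) := by
    omega
  rw [hd]
  by_cases hle : M ≤ h
  · rw [if_pos (by omega)]
    simp only [rowOf]
    rw [if_neg (by omega), if_pos hle]
    rfl
  · rw [if_neg (by omega)]
    simp only [rowOf]
    rw [if_neg (by omega), if_neg hle]
    rw [show ((M : Int) - ((h : Nat) : Int) - 1) = ((M - h - 1 : Nat) : Int) by omega]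
    rw [pyRepeat_pair_eq]
    rfl

-- B's full row list ([border] ++ middle ++ [border]) is the single mirrored pass
theorem fullB_eq (h : Nat) :
    [PySem.List.pyRepeat ['#'] (3 * ((2 * h : Nat) : Int) + 2)] ++
      (List.range (4 * h)).map
        ((fun x : Int =>
            if min x (2 * ((2 * h : Nat) : Int) + 1 - x) ≤ ((h : Nat) : Int) then
              '#' :: PySem.List.pyRepeat [' '] (3 * ((2 * h : Nat) : Int)) ++ ['#']
            else
              '#' :: pyCenter ('*' ::
                  (PySem.List.pyRepeat ['o', 'o'] (min x (2 * ((2 * h : Nat) : Int) + 1 - x) - ((h : Nat) : Int) - 1) ++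
                   ['*'])) (3 * ((2 * h : Nat) : Int)) ++ ['#']) ∘
          (fun k : Nat => (1 : Int) + (k : Int))) ++
      [PySem.List.pyRepeat ['#'] (3 * ((2 * h : Nat) : Int) + 2)]
    = (List.range (4 * h + 2)).map (fun j => rowOf h (min j (4 * h + 1 - j))) := by
  rw [show 4 * h + 2 = (4 * h + 1) + 1 by ring, List.range_succ, List.map_append,
      List.range_succ_eq_map, List.map_cons, List.map_map]
  have hmid : (List.range (4 * h)).map ((fun j => rowOf h (min j (4 * h + 1 - j))) ∘ Nat.succ)
      = (List.range (4 * h)).map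
        ((fun x : Int =>
            if min x (2 * ((2 * h : Nat) : Int) + 1 - x) ≤ ((h : Nat) : Int) then
              '#' :: PySem.List.pyRepeat [' '] (3 * ((2 * h : Nat) : Int)) ++ ['#']
            else
              '#' :: pyCenter ('*' ::
                  (PySem.List.pyRepeat ['o', 'o'] (min x (2 * ((2 * h : Nat) : Int) + 1 - x) - ((h : Nat) : Int) - 1) ++
                   ['*'])) (3 * ((2 * h : Nat) : Int)) ++ ['#']) ∘
          (fun k : Nat => (1 : Int) + (k : Int))) := by
    apply List.map_congr_left
    intro k hk
    exact (rowB_eq h k (List.mem_range.mp hk)).symm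
  rw [hmid]
  simp [rowOf, borderRow]

-- the single mirrored pass equals half ++ reverse half
theorem mirror_eq (h : Nat) :
    (List.range (4 * h + 2)).map (fun j => rowOf h (min j (4 * h + 1 - j)))
    = (List.range (2 * h + 1)).map (rowOf h) ++ ((List.range (2 * h + 1)).map (rowOf h)).reverse := by
  apply List.ext_getElem
  · simp; omega
  · intro j hj1 hj2
    simp only [List.length_map, List.length_range] at hj1
    rw [List.getElem_map, List.getElem_range]
    by_cases hcase : j < 2 * h + 1
    · rw [List.getElem_append_left (by simp; omega)]
      rw [List.getElem_map, List.getElem_range]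
      congr 1
      omega
    · rw [List.getElem_append_right (by simp; omega)]
      rw [List.getElem_reverse, List.getElem_map, List.getElem_range]
      congr 1
      simp only [List.length_map, List.length_range]
      omega

-- ===== VERDICT (by name: the statement is the Claim_ definition above) =====
theorem flag_spec : Claim_equal_flag := by
  intro n _ hpre
  show flag _ = flag_alt _
  by_cases hneg : 0 ≤ n
  · -- n even and nonnegative: n = 2h
    obtain ⟨h, hh⟩ : ∃ h : Nat, n = ((2 * h : Nat) : Int) := ⟨n.toNat / 2, by unfold Pre_flag at hpre; omega⟩
    subst hh
    simp only [flag, flag_alt, PySem.List.foldl_append_singleton_eq_map,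
      PySem.List.slice?_none_none_neg_one, Option.getD_some, floordiv_two_nat,
      PySem.List.pyRange_one, List.nil_append]
    rw [show (((h : Nat) : Int) - 0).toNat = h by omega,
        show ((2 * ((2 * h : Nat) : Int) + 1) - 1).toNat = 4 * h by omega]
    rw [List.map_map, List.map_map]
    rw [fullB_eq, halfA_eq, mirror_eq]
  · -- n even and negative: both sides are the two (empty) border rows
    have hfd : PySem.Int.floordiv n 2 < 0 := by
      rw [PySem.Int.floordiv_lt_iff_lt_mul (by omega)]
      omega
    simp only [flag, flag_alt, PySem.List.foldl_append_singleton_eq_map,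
      PySem.List.slice?_none_none_neg_one, Option.getD_some]
    rw [PySem.List.pyRange_one_eq_nil (by omega), PySem.List.pyRange_one_eq_nil (by omega)]
    rw [PySem.List.pyRepeat_singleton ('#' :: PySem.List.pyRepeat [' '] (3 * n) ++ ['#']) (PySem.Int.floordiv n 2)]
    rw [show (PySem.Int.floordiv n 2).toNat = 0 by omega]
    simp
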